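-- pv_equiv track=rewrite | github.com/WallerTsai/OJ-Solution | leetcode-py/前缀/前缀和/前缀和+哈希表/No3739.py | countMajoritySubarrays
-- ===== SOURCE A (Python) =====
-- from typing import List
--
-- class NumArray:
--
--     # 获取最低位 1 的位置
--     @staticmethod
--     def lowbit(x):
--         return x & -x
--
--     def __init__(self, n: int):
--         self.n = n
--         self.tree = [0] * (n + 1)
--
--     # 添加值
--     def add(self, index: int, value: int) -> None:
--         index += 1
--         while index <= self.n:
--             self.tree[index] += value
--             index += self.lowbit(index)
--
--     # 求前缀和
--     def query(self, index: int) -> int: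
--         res = 0
--         while index > 0:
--             res += self.tree[index]
--             index -= self.lowbit(index)
--         return res
--
--     def sumRange(self, left: int, right: int) -> int:
--         return self.query(right + 1) - self.query(left)
--
-- def countMajoritySubarrays(nums: List[int], target: int) -> int:
--     n = len(nums)
--     # 映射： 前缀和 [-n,n] => [0,2n] => 树状数组 [1,2n+1]
--     N = 2 * n + 1
--     na = NumArray(N)
--
--     pre = 0
--     na.add(n, 1)
--
--     ans = 0
--     for num in nums:
--         if num == target:
--             pre += 1
--         else:
--             pre -= 1
--
--         # [-n,pre-1] => [0,pre-1+n]
--         temp = pre - 1 + n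
--         if temp >= 0:
--             ans += na.sumRange(0, temp)
--
--         na.add(pre + n, 1)
--
--     return ans  # 1323ms
-- ===== SOURCE B (Python) =====
-- def countMajoritySubarrays(nums, target):
--     # One pass with a hash counter of prefix values and an incrementally
--     # maintained count 'below' of earlier prefixes strictly less than the
--     # current prefix (the prefix changes by exactly 1 per step), O(n).
--     cnt = {0: 1}
--     pre = 0
--     below = 0
--     ans = 0
--     for num in nums:
--         if num == target:
--             below += cnt.get(pre, 0)
--             pre += 1
--         else:
--             pre -= 1
--             below -= cnt.get(pre, 0)
--         ans += below
--         cnt[pre] = cnt.get(pre, 0) + 1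
--     return ans
-- ===== Notes on version B (the rewrite author's own statement) =====
-- stated objective: faster
-- what changed: Replaced the Fenwick (binary indexed) tree over shifted prefix sums with a plain hash counter of prefix values plus an incrementally maintained count of earlier prefixes strictly below the current one (valid because the prefix changes by exactly 1 per step).
import Mathlib
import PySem

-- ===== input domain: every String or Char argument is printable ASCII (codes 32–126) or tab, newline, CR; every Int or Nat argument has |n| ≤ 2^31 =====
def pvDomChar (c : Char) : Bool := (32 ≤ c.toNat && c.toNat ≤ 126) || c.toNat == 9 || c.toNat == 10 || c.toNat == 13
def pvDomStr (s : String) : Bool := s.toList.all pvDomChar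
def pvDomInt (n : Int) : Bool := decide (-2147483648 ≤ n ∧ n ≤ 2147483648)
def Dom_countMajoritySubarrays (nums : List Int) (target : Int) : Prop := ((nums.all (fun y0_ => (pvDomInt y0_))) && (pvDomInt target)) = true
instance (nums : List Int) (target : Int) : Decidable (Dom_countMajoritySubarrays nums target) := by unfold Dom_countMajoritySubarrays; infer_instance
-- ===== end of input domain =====

-- B replaces A's Fenwick tree over shifted prefix sums by a hash counter with an
-- incrementally maintained count of earlier prefixes below the current one (the
-- prefix changes by exactly 1 per step); objective: faster (O(n log n) → O(n)).

-- ===== PORT A =====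
-- NumArray.lowbit: x & -x
def pyLowbit (x : Int) : Int := PySem.Int.band x (-x)

-- Python 'self.tree[index] += value'; exact for 0 ≤ index < len(tree), the only
-- indices A ever uses (1 ≤ index ≤ self.n, tree has n+1 entries).
def pyListAddAt (tree : List Int) (index : Int) (value : Int) : List Int :=
  tree.set index.toNat (tree.getD index.toNat 0 + value)

-- NumArray.add's while loop; fuel bounds the iteration count (index grows by
-- lowbit(index) ≥ 1 each pass, so n.toNat + 1 iterations always suffice).
def naAddLoop (fuel : Nat) (n : Int) (tree : List Int) (index : Int) (value : Int) : List Int :=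
  match fuel with
  | 0 => tree
  | fuel + 1 =>
    if index ≤ n then naAddLoop fuel n (pyListAddAt tree index value) (index + pyLowbit index) value
    else tree

-- NumArray.add (does index += 1 first)
def naAdd (n : Int) (tree : List Int) (index : Int) (value : Int) : List Int :=
  naAddLoop (n.toNat + 1) n tree (index + 1) value

-- NumArray.query's while loop (index shrinks by lowbit(index) ≥ 1 each pass)
def naQueryLoop (fuel : Nat) (tree : List Int) (index : Int) (res : Int) : Int :=
  match fuel with
  | 0 => res
  | fuel + 1 =>
    if 0 < index then naQueryLoop fuel tree (index - pyLowbit index) (res + tree.getD index.toNat 0)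
    else res

def naQuery (tree : List Int) (index : Int) : Int := naQueryLoop (index.toNat + 1) tree index 0

def naSumRange (tree : List Int) (left right : Int) : Int :=
  naQuery tree (right + 1) - naQuery tree left

-- the body of A's 'for num in nums' loop; state = (na.tree, pre, ans)
def stepA (target n N : Int) (s : List Int × Int × Int) (num : Int) : List Int × Int × Int :=
  let pre := if num = target then s.2.1 + 1 else s.2.1 - 1
  let temp := pre - 1 + n
  let ans := if 0 ≤ temp then s.2.2 + naSumRange s.1 0 temp else s.2.2
  (naAdd N s.1 (pre + n) 1, pre, ans)

def countMajoritySubarrays (nums : List Int) (target : Int) : Int :=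
  let n : Int := nums.length
  let N : Int := 2 * n + 1
  let tree1 := naAdd N (List.replicate (N.toNat + 1) 0) n 1
  (nums.foldl (stepA target n N) (tree1, 0, 0)).2.2

-- ===== PORT B =====
-- the body of B's loop; state = (cnt, pre, below, ans)
def stepB (target : Int) (s : PySem.Dict Int Int × Int × Int × Int) (num : Int) :
    PySem.Dict Int Int × Int × Int × Int :=
  let cnt := s.1
  let (pre, below) :=
    if num = target then (s.2.1 + 1, s.2.2.1 + cnt.getD s.2.1 0)
    else (s.2.1 - 1, s.2.2.1 - cnt.getD (s.2.1 - 1) 0)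
  (cnt.insert pre (cnt.getD pre 0 + 1), pre, below, s.2.2.2 + below)

def countMajoritySubarrays_alt (nums : List Int) (target : Int) : Int :=
  (nums.foldl (stepB target) (PySem.Dict.empty.insert 0 1, 0, 0, 0)).2.2.2

-- ===== PRECONDITION & SPEC =====
def Spec_countMajoritySubarrays (nums : List Int) (target : Int) (out : Int) : Prop := out = countMajoritySubarrays_alt nums target
instance (nums : List Int) (target : Int) (out : Int) : Decidable (Spec_countMajoritySubarrays nums target out) := by unfold Spec_countMajoritySubarrays; infer_instance

-- ===== CLAIM (what is proved, stated in full; the proofs are below) =====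
def Claim_equal_countMajoritySubarrays : Prop := ∀ (nums : List Int) (target : Int), Dom_countMajoritySubarrays nums target → Spec_countMajoritySubarrays nums target (countMajoritySubarrays nums target)

-- ===== LEMMAS AND PROOFS =====

-- the common reference loop: seen = prefixes recorded so far; each step counts
-- the earlier prefixes strictly below the new prefix.
def refLoop (target : Int) : List Int → List Int → Int → Int → Int
  | [], _, _, ans => ans
  | num :: l, seen, pre, ans =>
    let pre' := if num = target then pre + 1 else pre - 1
    refLoop target l (seen ++ [pre']) pre' (ans + (seen.countP (fun p => decide (p < pre')) : Int))

-- ---- lowbit ----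

lemma nat_land_pred (c v : Nat) :
    (2 ^ c * (2 * v + 1)) &&& (2 ^ c * (2 * v + 1) - 1) = 2 ^ (c + 1) * v := by
  have hp : (2:Nat) ^ (c + 1) = 2 ^ c * 2 := pow_succ 2 c
  have hc : 1 ≤ (2:Nat) ^ c := Nat.one_le_two_pow
  have hm : 2 ^ c * (2 * v + 1) = 2 ^ (c + 1) * v + 2 ^ c := by rw [hp]; ring
  have hm1 : 2 ^ c * (2 * v + 1) - 1 = 2 ^ (c + 1) * v + (2 ^ c - 1) := by omega
  have hd1 : (2 ^ (c + 1) * v + 2 ^ c) / 2 ^ (c + 1) = v := by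
    rw [Nat.mul_add_div (by positivity), Nat.div_eq_of_lt (by omega), Nat.add_zero]
  have hd2 : (2 ^ (c + 1) * v + (2 ^ c - 1)) / 2 ^ (c + 1) = v := by
    rw [Nat.mul_add_div (by positivity), Nat.div_eq_of_lt (by omega), Nat.add_zero]
  have hdiv : ((2 ^ c * (2 * v + 1)) &&& (2 ^ c * (2 * v + 1) - 1)) / 2 ^ (c + 1) = v := by
    rw [Nat.and_div_two_pow, hm1, hm, hd1, hd2, Nat.and_self]
  have hmod : ((2 ^ c * (2 * v + 1)) &&& (2 ^ c * (2 * v + 1) - 1)) % 2 ^ (c + 1) = 0 := by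
    rw [Nat.and_mod_two_pow, hm1, hm, Nat.mul_add_mod, Nat.mul_add_mod,
      Nat.mod_eq_of_lt (by omega), Nat.mod_eq_of_lt (by omega),
      Nat.and_two_pow_sub_one_eq_mod, Nat.mod_self]
  conv_lhs => rw [← Nat.div_add_mod ((2 ^ c * (2 * v + 1)) &&& (2 ^ c * (2 * v + 1) - 1)) (2 ^ (c + 1))]
  rw [hdiv, hmod, Nat.add_zero]

lemma lowbit_decomp (x : Int) (hx : 1 ≤ x) :
    ∃ c v : Nat, x = 2 ^ c * (2 * (v : Int) + 1) ∧ pyLowbit x = 2 ^ c := by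
  have hm0 : x.toNat ≠ 0 := by omega
  obtain ⟨c, u, hu2, hu⟩ := Nat.exists_eq_pow_mul_and_not_dvd hm0 2 (by norm_num)
  have hu1 : u % 2 = 1 := by
    rcases Nat.mod_two_eq_zero_or_one u with h | h
    · exact absurd (Nat.dvd_of_mod_eq_zero h) hu2
    · exact h
  obtain ⟨w, hw⟩ : ∃ w : Nat, u = 2 * w + 1 := ⟨u / 2, by omega⟩
  refine ⟨c, w, ?_, ?_⟩
  · have hx' : x = (x.toNat : Int) := by omega
    rw [hx', hu, hw]; push_cast; ring
  · have hb1 : pyLowbit x = ((x.toNat - (x.toNat &&& (x - 1).toNat) : Nat) : Int) := by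
      simp only [pyLowbit, PySem.Int.band]
      rw [if_pos (by omega : (0:Int) ≤ x), if_neg (by omega : ¬ (0:Int) ≤ -x)]
      have hxx : - -x - 1 = x - 1 := by ring
      rw [hxx]
    have ht1 : (x - 1).toNat = x.toNat - 1 := by omega
    rw [hb1, ht1]
    have hland : x.toNat &&& (x.toNat - 1) = 2 ^ (c + 1) * w := by
      conv_lhs => rw [hu, hw]
      exact nat_land_pred c w
    rw [hland]
    have hp : (2:Nat) ^ (c + 1) = 2 ^ c * 2 := pow_succ 2 c
    have hsub : x.toNat - 2 ^ (c + 1) * w = 2 ^ c := by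
      rw [hu, hw, hp]; ring_nf; omega
    rw [hsub]; push_cast; ring

lemma lowbit_pos (x : Int) (hx : 1 ≤ x) : 1 ≤ pyLowbit x := by
  obtain ⟨c, v, _, h⟩ := lowbit_decomp x hx
  rw [h]
  have := pow_pos (show (0:Int) < 2 by norm_num) c
  omega

lemma lowbit_le (x : Int) (hx : 1 ≤ x) : pyLowbit x ≤ x := by
  obtain ⟨c, v, hx', h⟩ := lowbit_decomp x hx
  rw [h, hx']; nlinarith [pow_pos (by norm_num : (0:Int) < 2) c]

-- the Fenwick path fact: for i ≠ j (both ≥ 1) the node i is updated by the add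
-- started at j + lowbit j exactly when it is updated by the add started at j.
lemma pc_step (i j : Int) (hi : 1 ≤ i) (hj : 1 ≤ j) (hne : i ≠ j) :
    ((i - pyLowbit i < j + pyLowbit j ∧ j + pyLowbit j ≤ i) ↔ (i - pyLowbit i < j ∧ j ≤ i)) := by
  obtain ⟨b, q, hiq, hlbi⟩ := lowbit_decomp i hi
  obtain ⟨c, u, hju, hlbj⟩ := lowbit_decomp j hj
  rw [hlbi, hlbj]
  have h2b : (0:Int) < 2 ^ b := by positivity
  have h2c : (0:Int) < 2 ^ c := by positivity
  obtain ⟨M, hiM, hMdvd⟩ : ∃ M : Int, i = M + 2 ^ b ∧ (2:Int) ^ (b + 1) ∣ M :=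
    ⟨2 ^ (b + 1) * q, by rw [hiq, pow_succ]; ring, dvd_mul_right _ _⟩
  have hjdvd : (2:Int) ^ c ∣ j := ⟨2 * u + 1, hju⟩
  have hT : (2:Int) ^ (c + 1) ∣ j + 2 ^ c := ⟨u + 1, by rw [hju, pow_succ]; ring⟩
  have hjodd : ¬ (2:Int) ^ (c + 1) ∣ j := by
    rintro ⟨k, hk⟩
    rw [hju, pow_succ, mul_assoc] at hk
    have := mul_left_cancel₀ (ne_of_gt h2c) hk
    omega
  have hb1 : (2:Int) ^ (b + 1) = 2 ^ b * 2 := pow_succ 2 b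
  have hc1 : (2:Int) ^ (c + 1) = 2 ^ c * 2 := pow_succ 2 c
  constructor
  · rintro ⟨h1, h2⟩
    refine ⟨?_, by omega⟩
    by_contra hcon
    have hjM : j ≤ M := by omega
    by_cases hbc : b + 1 ≤ c
    · have hTb : (2:Int) ^ (b + 1) ∣ j + 2 ^ c :=
        dvd_trans (pow_dvd_pow 2 (by omega : b + 1 ≤ c + 1)) hT
      have hdsub : (2:Int) ^ (b + 1) ∣ (j + 2 ^ c) - M := dvd_sub hTb hMdvd
      have hle : (2:Int) ^ (b + 1) ≤ (j + 2 ^ c) - M := Int.le_of_dvd (by omega) hdsub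
      omega
    · have hdvdMc : (2:Int) ^ c ∣ M :=
        dvd_trans (pow_dvd_pow 2 (by omega : c ≤ b + 1)) hMdvd
      have hjM_eq : j = M := by
        by_contra hne2
        have hlt : j < M := lt_of_le_of_ne hjM hne2
        have hd : (2:Int) ^ c ∣ M - j := dvd_sub hdvdMc hjdvd
        have hle : (2:Int) ^ c ≤ M - j := Int.le_of_dvd (by omega) hd
        omega
      exact hjodd (hjM_eq ▸ dvd_trans (pow_dvd_pow 2 (by omega : c + 1 ≤ b + 1)) hMdvd)
  · rintro ⟨h1, h2⟩
    have hji : j < i := lt_of_le_of_ne h2 (Ne.symm hne)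
    refine ⟨by omega, ?_⟩
    have hcb : c < b := by
      by_contra hcb
      have hjb : (2:Int) ^ b ∣ j := dvd_trans (pow_dvd_pow 2 (by omega : b ≤ c)) hjdvd
      have hMb : (2:Int) ^ b ∣ M := dvd_trans (pow_dvd_pow 2 (by omega : b ≤ b + 1)) hMdvd
      have hd : (2:Int) ^ b ∣ j - M := dvd_sub hjb hMb
      have hle : (2:Int) ^ b ≤ j - M := Int.le_of_dvd (by omega) hd
      omega
    have hMc1 : (2:Int) ^ (c + 1) ∣ M :=
      dvd_trans (pow_dvd_pow 2 (by omega : c + 1 ≤ b + 1)) hMdvd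
    have hA : (2:Int) ^ (c + 1) ∣ (j + 2 ^ c) - M := dvd_sub hT hMc1
    have hfin : j + 2 ^ c - M ≤ 2 ^ b := by
      by_contra hgt
      have hpb : (2:Int) ^ (c + 1) ∣ 2 ^ b := pow_dvd_pow 2 (by omega : c + 1 ≤ b)
      have hd : (2:Int) ^ (c + 1) ∣ (j + 2 ^ c - M) - 2 ^ b := dvd_sub hA hpb
      have hle : (2:Int) ^ (c + 1) ≤ (j + 2 ^ c - M) - 2 ^ b := Int.le_of_dvd (by omega) hd
      omega
    omega

-- ---- add ----

lemma naAddLoop_length (fuel : Nat) (n : Int) (tree : List Int) (index value : Int) :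
    (naAddLoop fuel n tree index value).length = tree.length := by
  induction fuel generalizing tree index with
  | zero => rfl
  | succ fuel ih =>
    simp only [naAddLoop]
    split
    · rw [ih]; simp [pyListAddAt]
    · rfl

lemma pyListAddAt_getD (tree : List Int) (index v i : Int) (h0 : 1 ≤ index)
    (hlen : index.toNat < tree.length) (hi : 1 ≤ i) :
    (pyListAddAt tree index v).getD i.toNat 0
      = tree.getD i.toNat 0 + (if i = index then v else 0) := by
  by_cases h : i = index
  · subst h
    rw [if_pos rfl]
    simp [pyListAddAt, List.getD_eq_getElem?_getD, hlen]
  · have hne : index.toNat ≠ i.toNat := by omega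
    rw [if_neg h]
    simp [pyListAddAt, List.getD_eq_getElem?_getD, hne]

lemma naAddLoop_getD (fuel : Nat) (n : Int) (tree : List Int) (index value : Int)
    (hidx : 1 ≤ index) (hfuel : (n + 1 - index).toNat ≤ fuel)
    (hlen : tree.length = n.toNat + 1) :
    ∀ i : Int, 1 ≤ i → i ≤ n →
      (naAddLoop fuel n tree index value).getD i.toNat 0
        = tree.getD i.toNat 0
          + (if i - pyLowbit i < index ∧ index ≤ i then value else 0) := by
  induction fuel generalizing tree index with
  | zero =>
    intro i hi hiN
    have hidxn : n < index := by omega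
    rw [if_neg (by omega)]
    simp [naAddLoop]
  | succ fuel ih =>
    intro i hi hiN
    simp only [naAddLoop]
    split
    · rename_i hin
      have hlb := lowbit_pos index hidx
      have hlbi := lowbit_pos i hi
      rw [ih (pyListAddAt tree index value) (index + pyLowbit index) (by omega) (by omega)
            (by simp [pyListAddAt, hlen]) i hi hiN,
          pyListAddAt_getD tree index value i hidx (by omega) hi]
      by_cases hij : i = index
      · subst hij
        rw [if_pos rfl, if_neg (by omega), if_pos (by omega)]
        ring
      · rw [if_neg hij, if_congr (pc_step i index hi hidx hij) rfl rfl]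
        ring
    · rename_i hin
      rw [if_neg (by omega)]
      ring

lemma naAdd_getD (N : Int) (tree : List Int) (j v : Int) (hj : 0 ≤ j)
    (hlen : tree.length = N.toNat + 1) :
    ∀ i : Int, 1 ≤ i → i ≤ N →
      (naAdd N tree j v).getD i.toNat 0
        = tree.getD i.toNat 0 + (if i - pyLowbit i < j + 1 ∧ j + 1 ≤ i then v else 0) := by
  intro i hi hiN
  exact naAddLoop_getD (N.toNat + 1) N tree (j + 1) v (by omega) (by omega) hlen i hi hiN

lemma naAdd_length (N : Int) (tree : List Int) (j v : Int) :
    (naAdd N tree j v).length = tree.length := naAddLoop_length _ _ _ _ _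

-- ---- query ----

lemma naQueryLoop_nonpos (fuel : Nat) (tree : List Int) (t r : Int) (ht : t ≤ 0) :
    naQueryLoop fuel tree t r = r := by
  cases fuel with
  | zero => rfl
  | succ fuel => simp only [naQueryLoop]; rw [if_neg (by omega)]

lemma naQueryLoop_res (fuel : Nat) (tree : List Int) :
    ∀ (t r : Int), naQueryLoop fuel tree t r = r + naQueryLoop fuel tree t 0 := by
  induction fuel with
  | zero => intro t r; simp [naQueryLoop]
  | succ fuel ih =>
    intro t r
    simp only [naQueryLoop]
    split
    · rw [ih, ih (t - pyLowbit t) (0 + tree.getD t.toNat 0)]; ring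
    · ring

lemma naQueryLoop_fuel (tree : List Int) :
    ∀ (fuel₁ fuel₂ : Nat) (t : Int), t.toNat ≤ fuel₁ → t.toNat ≤ fuel₂ →
      naQueryLoop fuel₁ tree t 0 = naQueryLoop fuel₂ tree t 0 := by
  intro fuel₁
  induction fuel₁ with
  | zero =>
    intro fuel₂ t h1 h2
    rw [naQueryLoop_nonpos fuel₂ tree t 0 (by omega)]
    rfl
  | succ fuel ih =>
    intro fuel₂ t h1 h2
    by_cases ht : t ≤ 0
    · rw [naQueryLoop_nonpos _ _ _ _ ht, naQueryLoop_nonpos _ _ _ _ ht]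
    · cases fuel₂ with
      | zero => omega
      | succ g =>
        have hlb := lowbit_pos t (by omega)
        simp only [naQueryLoop]
        rw [if_pos (by omega), if_pos (by omega), naQueryLoop_res, naQueryLoop_res g,
          ih g (t - pyLowbit t) (by omega) (by omega)]

lemma naQueryLoop_succ (fuel : Nat) (tree : List Int) (t r : Int) :
    naQueryLoop (fuel + 1) tree t r
      = if 0 < t then naQueryLoop fuel tree (t - pyLowbit t) (r + tree.getD t.toNat 0) else r := rfl

lemma naQuery_nonpos (tree : List Int) (t : Int) (ht : t ≤ 0) : naQuery tree t = 0 := by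
  rw [naQuery, naQueryLoop_nonpos _ _ _ _ ht]

lemma naQuery_pos (tree : List Int) (t : Int) (ht : 0 < t) :
    naQuery tree t = tree.getD t.toNat 0 + naQuery tree (t - pyLowbit t) := by
  have hlb := lowbit_pos t (by omega)
  conv_lhs => rw [naQuery]
  rw [naQueryLoop_succ, if_pos ht, naQueryLoop_res,
    naQueryLoop_fuel tree t.toNat ((t - pyLowbit t).toNat + 1) (t - pyLowbit t) (by omega) (by omega),
    naQuery]
  ring

lemma naQuery_replicate (m : Nat) : ∀ (k : Nat) (t : Int), t.toNat = k →
    naQuery (List.replicate m 0) t = 0 := by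
  intro k
  induction k using Nat.strong_induction_on with
  | _ k ih =>
    intro t hk
    by_cases ht : t ≤ 0
    · exact naQuery_nonpos _ t ht
    · have hlb := lowbit_pos t (by omega)
      rw [naQuery_pos _ t (by omega)]
      have hz : (List.replicate m (0:Int)).getD t.toNat 0 = 0 := by
        by_cases hb : t.toNat < m
        · exact List.getD_replicate 0 hb
        · exact List.getD_eq_default _ _ (by simp; omega)
      rw [hz, ih (t - pyLowbit t).toNat (by omega) (t - pyLowbit t) rfl]
      norm_num

-- query after an add: the count goes up by v exactly on prefixes covering j+1
lemma query_add (N : Int) (tree : List Int) (j v : Int) (hj : 0 ≤ j) (_hjN : j + 1 ≤ N)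
    (hlen : tree.length = N.toNat + 1) :
    ∀ (k : Nat) (t : Int), t.toNat = k → 0 ≤ t → t ≤ N →
      naQuery (naAdd N tree j v) t = naQuery tree t + (if j + 1 ≤ t then v else 0) := by
  intro k
  induction k using Nat.strong_induction_on with
  | _ k ih =>
    intro t hk ht0 htN
    by_cases ht : t ≤ 0
    · rw [naQuery_nonpos _ t ht, naQuery_nonpos _ t ht, if_neg (by omega)]
      norm_num
    · have hlb := lowbit_pos t (by omega)
      have hlble := lowbit_le t (by omega)
      rw [naQuery_pos _ t (by omega), naQuery_pos tree t (by omega),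
        naAdd_getD N tree j v hj hlen t (by omega) htN,
        ih (t - pyLowbit t).toNat (by omega) (t - pyLowbit t) rfl (by omega) (by omega)]
      split_ifs <;> omega

-- ---- counting ----

lemma countP_lt_add_one (seen : List Int) (x : Int) :
    seen.countP (fun p => decide (p < x + 1))
      = seen.countP (fun p => decide (p < x)) + seen.count x := by
  induction seen with
  | nil => simp
  | cons p l ih =>
    simp only [List.countP_cons, List.count_cons, ih, beq_iff_eq, decide_eq_true_eq]
    split_ifs <;> omega

-- ---- A = ref ----

lemma A_loop (target n N : Int) (hN : N = 2 * n + 1) :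
    ∀ (l : List Int) (tree : List Int) (pre ans : Int) (seen : List Int),
      tree.length = N.toNat + 1 →
      (∀ t : Int, 0 ≤ t → t ≤ N →
        naQuery tree t = (seen.countP (fun p => decide (p + n + 1 ≤ t)) : Int)) →
      (∀ p ∈ seen, -n ≤ p ∧ p ≤ n) →
      (l.length : Int) ≤ n - pre → (l.length : Int) ≤ n + pre →
      (l.foldl (stepA target n N) (tree, pre, ans)).2.2 = refLoop target l seen pre ans := by
  intro l
  induction l with
  | nil =>
    intro tree pre ans seen hlen hq hseen hb1 hb2
    simp [refLoop]
  | cons num l ih =>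
    intro tree pre ans seen hlen hq hseen hb1 hb2
    push_cast [List.length_cons] at hb1 hb2
    simp only [List.foldl_cons, refLoop, stepA]
    set pre' := if num = target then pre + 1 else pre - 1 with hpre'
    have hpp : pre - 1 ≤ pre' ∧ pre' ≤ pre + 1 := by rw [hpre']; split <;> omega
    have hans : (if 0 ≤ pre' - 1 + n then ans + naSumRange tree 0 (pre' - 1 + n) else ans)
        = ans + (seen.countP (fun p => decide (p < pre')) : Int) := by
      split_ifs with htemp
      · have hcc : List.countP (fun p => decide (p + n + 1 ≤ pre' + n)) seen
            = List.countP (fun p => decide (p < pre')) seen :=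
          List.countP_congr (fun p _ => by
            simp only [decide_eq_true_eq]
            constructor <;> (intro; omega))
        rw [naSumRange, naQuery_nonpos tree 0 le_rfl,
          show pre' - 1 + n + 1 = pre' + n by ring,
          hq (pre' + n) (by omega) (by omega), hcc]
        ring
      · rw [List.countP_eq_zero.mpr (fun p hp => by
          have := hseen p hp
          simp only [decide_eq_true_eq, not_lt]
          omega)]
        push_cast
        ring
    rw [hans]
    refine ih (naAdd N tree (pre' + n) 1) pre' _ (seen ++ [pre']) ?_ ?_ ?_ (by omega) (by omega)
    · rw [naAdd_length]; exact hlen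
    · intro t ht0 htN
      rw [query_add N tree (pre' + n) 1 (by omega) (by omega) hlen t.toNat t rfl ht0 htN,
        hq t ht0 htN, List.countP_append]
      have hs : ([pre'].countP (fun p => decide (p + n + 1 ≤ t)) : Int)
          = (if pre' + n + 1 ≤ t then 1 else 0) := by
        by_cases hc : pre' + n + 1 ≤ t
        · rw [if_pos hc]; simp [List.countP_cons]; omega
        · rw [if_neg hc]; simp [List.countP_cons]; omega
      push_cast
      push_cast at hs
      omega
    · intro p hp
      rcases List.mem_append.mp hp with h | h
      · exact hseen p h
      · have : p = pre' := by simpa using h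
        omega

-- ---- B = ref ----

lemma dict_getD_incr (d : PySem.Dict Int Int) (k v : Int) :
    (d.insert k (d.getD k 0 + 1)).getD v 0 = d.getD v 0 + (if v = k then 1 else 0) := by
  have h := PySem.Dict.getD_foldl_insert_add_one [k] d v
  simp only [List.foldl_cons, List.foldl_nil] at h
  rw [h, List.count_singleton]
  by_cases hv : v = k
  · simp [hv]
  · simp [hv, Ne.symm hv]

lemma B_loop (target : Int) :
    ∀ (l : List Int) (cnt : PySem.Dict Int Int) (pre below ans : Int) (seen : List Int),
      (∀ v : Int, cnt.getD v 0 = (seen.count v : Int)) →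
      below = (seen.countP (fun p => decide (p < pre)) : Int) →
      (l.foldl (stepB target) (cnt, pre, below, ans)).2.2.2 = refLoop target l seen pre ans := by
  intro l
  induction l with
  | nil =>
    intro cnt pre below ans seen hcnt hbelow
    simp [refLoop]
  | cons num l ih =>
    intro cnt pre below ans seen hcnt hbelow
    simp only [List.foldl_cons, refLoop, stepB]
    by_cases h : num = target
    · rw [if_pos h, if_pos h]
      have hb' : below + cnt.getD pre 0 = ((seen.countP (fun p => decide (p < pre + 1)) : Nat) : Int) := by
        rw [hbelow, hcnt pre]
        push_cast [countP_lt_add_one seen pre]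
        ring
      rw [hb']
      refine ih _ _ _ _ (seen ++ [pre + 1]) ?_ ?_
      · intro v
        rw [dict_getD_incr, hcnt v, List.count_append]
        by_cases hv : v = pre + 1
        · simp [hv]
        · simp [hv, Ne.symm hv]
      · rw [List.countP_append]
        simp
    · rw [if_neg h, if_neg h]
      have hb' : below - cnt.getD (pre - 1) 0
          = ((seen.countP (fun p => decide (p < pre - 1)) : Nat) : Int) := by
        have h2 := countP_lt_add_one seen (pre - 1)
        rw [show pre - 1 + 1 = pre by ring] at h2
        rw [hbelow, hcnt (pre - 1)]
        push_cast [h2]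
        ring
      rw [hb']
      refine ih _ _ _ _ (seen ++ [pre - 1]) ?_ ?_
      · intro v
        rw [dict_getD_incr, hcnt v, List.count_append]
        by_cases hv : v = pre - 1
        · simp [hv]
        · simp [hv, Ne.symm hv]
      · rw [List.countP_append]
        simp

-- ===== VERDICT (by name: the statement is the Claim_ definition above) =====
theorem countMajoritySubarrays_spec : Claim_equal_countMajoritySubarrays := by
  intro nums target _
  unfold Spec_countMajoritySubarrays
  have hn0 : (0:Int) ≤ (nums.length : Int) := Int.natCast_nonneg _
  have hA : countMajoritySubarrays nums target = refLoop target nums [0] 0 0 := by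
    simp only [countMajoritySubarrays]
    refine A_loop target (nums.length : Int) (2 * (nums.length : Int) + 1) rfl nums _ 0 0 [0]
      ?_ ?_ ?_ (by omega) (by omega)
    · rw [naAdd_length, List.length_replicate]
    · intro t ht0 htN
      rw [query_add (2 * (nums.length : Int) + 1) _ (nums.length : Int) 1 hn0 (by omega)
          (by rw [List.length_replicate]) t.toNat t rfl ht0 htN,
        naQuery_replicate _ t.toNat t rfl]
      have hs : (([(0:Int)].countP (fun p => decide (p + (nums.length : Int) + 1 ≤ t))) : Int)
          = (if (nums.length : Int) + 1 ≤ t then 1 else 0) := by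
        by_cases hc : (nums.length : Int) + 1 ≤ t
        · rw [if_pos hc]; simp [List.countP_cons]; omega
        · rw [if_neg hc]; simp [List.countP_cons]; omega
      push_cast at hs ⊢
      omega
    · intro p hp
      have : p = 0 := by simpa using hp
      omega
  have hB : countMajoritySubarrays_alt nums target = refLoop target nums [0] 0 0 := by
    simp only [countMajoritySubarrays_alt]
    refine B_loop target nums _ 0 0 0 [0] ?_ (by simp)
    · intro v
      have h1 : (PySem.Dict.empty.insert 0 1 : PySem.Dict Int Int)
          = PySem.Dict.empty.insert 0 ((PySem.Dict.empty : PySem.Dict Int Int).getD 0 0 + 1) := by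
        rw [PySem.Dict.getD_empty]
        norm_num
      rw [h1, dict_getD_incr, PySem.Dict.getD_empty]
      by_cases hv : v = 0
      · simp [hv]
      · simp [hv, Ne.symm hv]
  rw [hA, hB]
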